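-- pv_equiv track=rewrite | github.com/nuoxoxo/coding-quest | 15_asteroid.py | way2
-- ===== SOURCE A (Python) =====
-- def way2(G) -> int:
--     dr=[-1,0,1, 0]
--     dc=[ 0,1,0,-1]
--     R, C = len(G), len(G[0])
--     seen=set()
--     res = 0
--     N = 0
--     def DFS_2(r,c) -> int:
--         if -1 < r < R and -1 < c < C and G[r][c] != 0 and (r,c) not in seen:
--             seen.add( (r,c) )
--             curr = G[r][c]
--             for i in range(4):
--                 curr += DFS_2( r + dr[i], c + dc[i] )
--             return curr
--         return 0
--     for r in range(R):
--         for c in range(C):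
--             if G[r][c] != 0 and (r,c) not in seen:
--                 res += DFS_2(r, c)
--                 N += 1
--     return res//N
-- ===== SOURCE B (Python) =====
-- def way2(G) -> int:
--     R, C = len(G), len(G[0])
--     total = sum(sum(row[:C]) for row in G)
--     seen = set()
--     N = 0
--     for r in range(R):
--         for c in range(C):
--             if G[r][c] != 0 and (r, c) not in seen:
--                 N += 1
--                 stack = [(r, c)]
--                 while stack:
--                     i, j = stack.pop()
--                     if 0 <= i < R and 0 <= j < C and G[i][j] != 0 and (i, j) not in seen:
--                         seen.add((i, j))
--                         stack.extend([(i, j - 1), (i + 1, j), (i, j + 1), (i - 1, j)])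
--     return total // N
-- ===== Notes on version B (the rewrite author's own statement) =====
-- stated objective: alternative
-- what changed: B replaces A's recursive DFS (which sums each component while marking it) by an explicit-stack iterative flood fill used only to mark/count components, and computes the numerator separately as one plain whole-grid sum.
import Mathlib
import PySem

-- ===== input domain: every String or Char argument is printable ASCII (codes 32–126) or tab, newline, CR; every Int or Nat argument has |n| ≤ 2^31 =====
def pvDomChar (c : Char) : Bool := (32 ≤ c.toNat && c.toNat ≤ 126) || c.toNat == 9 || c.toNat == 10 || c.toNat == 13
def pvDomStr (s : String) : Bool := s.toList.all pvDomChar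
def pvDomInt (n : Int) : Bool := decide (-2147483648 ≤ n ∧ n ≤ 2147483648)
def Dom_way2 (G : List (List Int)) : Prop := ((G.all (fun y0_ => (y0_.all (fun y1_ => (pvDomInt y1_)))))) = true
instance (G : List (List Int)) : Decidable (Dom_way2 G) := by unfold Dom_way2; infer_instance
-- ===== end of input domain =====

-- B replaces A's recursive DFS by an explicit-stack flood fill and computes the numerator as one
-- plain whole-grid sum instead of accumulating per-component DFS sums (objective: alternative).

-- G[r][c]; both Pythons index this way, and it is only evaluated in range under Pre_way2
def cellAt (G : List (List Int)) (r c : Int) : Int :=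
  PySem.List.pyGetD (PySem.List.pyGetD G r []) c 0

-- ===== PORT A =====
-- A's recursive DFS_2; `seen` is threaded through (Python mutates a closure set).
-- `fuel` only makes the recursion structural; way2 passes R*C+1, which the recursion depth
-- (at most one frame per newly seen cell, plus one) never exhausts.
def way2Dfs (G : List (List Int)) (R C : Int) (fuel : Nat) (r c : Int)
    (seen : PySem.Set (Int × Int)) : Int × PySem.Set (Int × Int) :=
  match fuel with
  | 0 => (0, seen)
  | fuel + 1 =>
    if (-1 < r ∧ r < R) ∧ (-1 < c ∧ c < C) ∧ cellAt G r c ≠ 0 ∧ (r, c) ∉ seen then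
      let seen1 := PySem.Set.add seen (r, c)
      let curr := cellAt G r c
      (PySem.List.pyRange 0 4 1).foldl
        (fun (st : Int × PySem.Set (Int × Int)) i =>
          let out := way2Dfs G R C fuel (r + PySem.List.pyGetD [-1, 0, 1, 0] i 0)
            (c + PySem.List.pyGetD [0, 1, 0, -1] i 0) st.2
          (st.1 + out.1, out.2))
        (curr, seen1)
    else (0, seen)

def way2 (G : List (List Int)) : Int :=
  let R : Int := G.length
  let C : Int := ((PySem.List.pyGetD G 0 []) : List Int).length
  let fuel : Nat := G.length * ((PySem.List.pyGetD G 0 []) : List Int).length + 1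
  let st :=
    (PySem.List.pyRange 0 R 1).foldl (fun st r =>
      (PySem.List.pyRange 0 C 1).foldl (fun (st : Int × Int × PySem.Set (Int × Int)) c =>
        if cellAt G r c ≠ 0 ∧ (r, c) ∉ st.2.2 then
          let out := way2Dfs G R C fuel r c st.2.2
          (st.1 + out.1, st.2.1 + 1, out.2)
        else st) st) (0, 0, [])
  PySem.Int.floordiv st.1 st.2.1

-- ===== PORT B =====
-- grid cells (r, c), 0 ≤ r < R, 0 ≤ c < C (proof-side universe; also bounds B's fill termination)
def gridCells (R C : Int) : List (Int × Int) :=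
  (PySem.List.pyRange 0 R 1).flatMap (fun r => (PySem.List.pyRange 0 C 1).map (fun c => (r, c)))

-- number of in-bounds nonzero cells not yet seen (termination measure of the while loop)
def unseenCount (G : List (List Int)) (R C : Int) (seen : List (Int × Int)) : Nat :=
  ((gridCells R C).filter (fun p => cellAt G p.1 p.2 != 0 && !(seen.contains p))).length

lemma filter_length_le {α : Type} (l : List α) (P Q : α → Bool)
    (hmono : ∀ x ∈ l, Q x → P x) : (l.filter Q).length ≤ (l.filter P).length := by
  induction l with
  | nil => simp
  | cons x xs ih =>
    have ih' := ih (fun y hy => hmono y (List.mem_cons_of_mem _ hy))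
    simp only [List.filter_cons]
    by_cases hq : Q x
    · rw [if_pos hq, if_pos (hmono x List.mem_cons_self hq)]; simpa using ih'
    · rw [if_neg (by simpa using hq)]
      by_cases hp : P x
      · rw [if_pos hp]; simp; omega
      · rw [if_neg (by simpa using hp)]; exact ih'

lemma filter_length_lt {α : Type} (l : List α) (P Q : α → Bool)
    (hmono : ∀ x ∈ l, Q x → P x) (a : α) (ha : a ∈ l) (hP : P a) (hQ : ¬ Q a) :
    (l.filter Q).length < (l.filter P).length := by
  induction l with
  | nil => cases ha
  | cons x xs ih =>
    have hm : ∀ y ∈ xs, Q y → P y := fun y hy => hmono y (List.mem_cons_of_mem _ hy)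
    simp only [List.filter_cons]
    rcases List.mem_cons.mp ha with rfl | ha'
    · rw [if_pos hP, if_neg (by simpa using hQ)]
      have := filter_length_le xs P Q hm
      simp; omega
    · have ihlt := ih hm ha'
      by_cases hq : Q x
      · rw [if_pos hq, if_pos (hmono x List.mem_cons_self hq)]; simpa using ihlt
      · rw [if_neg (by simpa using hq)]
        by_cases hp : P x
        · rw [if_pos hp]; simp; omega
        · rw [if_neg (by simpa using hp)]; exact ihlt

lemma mem_gridCells {R C : Int} {p : Int × Int} :
    p ∈ gridCells R C ↔ 0 ≤ p.1 ∧ p.1 < R ∧ 0 ≤ p.2 ∧ p.2 < C := by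
  obtain ⟨i, j⟩ := p
  constructor
  · intro h
    simp only [gridCells, List.mem_flatMap, List.mem_map] at h
    obtain ⟨r, hr, c, hc, hpq⟩ := h
    cases hpq
    rw [PySem.List.mem_pyRange_one] at hr hc
    exact ⟨hr.1, hr.2, hc.1, hc.2⟩
  · rintro ⟨h1, h2, h3, h4⟩
    simp only [gridCells, List.mem_flatMap, List.mem_map]
    exact ⟨i, by rw [PySem.List.mem_pyRange_one]; exact ⟨h1, h2⟩,
      j, by rw [PySem.List.mem_pyRange_one]; exact ⟨h3, h4⟩, rfl⟩

lemma unseen_lt_of_add {G : List (List Int)} {R C : Int} {seen : List (Int × Int)}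
    {i j : Int} (hib : 0 ≤ i ∧ i < R) (hjb : 0 ≤ j ∧ j < C)
    (hnz : cellAt G i j ≠ 0) (hns : (i, j) ∉ seen) :
    unseenCount G R C (PySem.Set.add seen (i, j)) < unseenCount G R C seen := by
  unfold unseenCount
  refine filter_length_lt _ _ _ ?_ (i, j) (mem_gridCells.mpr ⟨hib.1, hib.2, hjb.1, hjb.2⟩) ?_ ?_
  · intro x hxg hx
    simp only [Bool.and_eq_true, bne_iff_ne, ne_eq, Bool.not_eq_true', List.contains_eq_mem,
      decide_eq_false_iff_not] at hx ⊢
    exact ⟨hx.1, fun hmem => hx.2 (by rw [PySem.Set.mem_add]; exact Or.inl hmem)⟩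
  · simp only [Bool.and_eq_true, bne_iff_ne, ne_eq, Bool.not_eq_true', List.contains_eq_mem,
      decide_eq_false_iff_not]
    exact ⟨hnz, hns⟩
  · simp only [Bool.and_eq_true, bne_iff_ne, ne_eq, Bool.not_eq_true', List.contains_eq_mem,
      decide_eq_false_iff_not, not_and, not_not]
    intro _
    rw [PySem.Set.mem_add]
    exact Or.inr rfl

-- B's while loop over an explicit stack; the Lean list's head is the Python list's popping end
def way2AltFill (G : List (List Int)) (R C : Int) (stack : List (Int × Int))
    (seen : PySem.Set (Int × Int)) : PySem.Set (Int × Int) :=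
  match stack with
  | [] => seen
  | (i, j) :: rest =>
    if h : (0 ≤ i ∧ i < R) ∧ (0 ≤ j ∧ j < C) ∧ cellAt G i j ≠ 0 ∧ (i, j) ∉ seen then
      way2AltFill G R C ((i - 1, j) :: (i, j + 1) :: (i + 1, j) :: (i, j - 1) :: rest)
        (PySem.Set.add seen (i, j))
    else
      way2AltFill G R C rest seen
termination_by (unseenCount G R C seen, stack.length)
decreasing_by
  · exact Prod.Lex.left _ _ (unseen_lt_of_add h.1 h.2.1 h.2.2.1 h.2.2.2)
  · exact Prod.Lex.right _ (Nat.lt_succ_self _)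

def way2_alt (G : List (List Int)) : Int :=
  let R : Int := G.length
  let C : Int := ((PySem.List.pyGetD G 0 []) : List Int).length
  let total : Int := (G.map (fun row => (PySem.List.slice row none (some C)).sum)).sum
  let st :=
    (PySem.List.pyRange 0 R 1).foldl (fun st r =>
      (PySem.List.pyRange 0 C 1).foldl (fun (st : Int × PySem.Set (Int × Int)) c =>
        if cellAt G r c ≠ 0 ∧ (r, c) ∉ st.2 then
          (st.1 + 1, way2AltFill G R C [(r, c)] st.2)
        else st) st) (0, [])
  PySem.Int.floordiv total st.1

-- ===== PRECONDITION & SPEC =====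
-- Pre_way2 excludes exactly the inputs where Python A raises: the empty grid (IndexError on G[0]),
-- a row shorter than the first row (IndexError on G[r][c]), and a grid whose first len(G[0])
-- columns are all zero (ZeroDivisionError on res//N).
def Pre_way2 (G : List (List Int)) : Prop :=
  G ≠ [] ∧ (∀ row ∈ G, (G.headD []).length ≤ row.length) ∧
    (∃ row ∈ G, ∃ v ∈ row.take (G.headD []).length, v ≠ 0)
instance (G : List (List Int)) : Decidable (Pre_way2 G) := by unfold Pre_way2; infer_instance

def pvWitness_way2 : List (List Int) := [[1]]

def Spec_way2 (G : List (List Int)) (out : Int) : Prop := out = way2_alt G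
instance (G : List (List Int)) (out : Int) : Decidable (Spec_way2 G out) := by unfold Spec_way2; infer_instance

-- ===== CLAIM (what is proved, stated in full; the proofs are below) =====
def Claim_equal_way2 : Prop := ∀ (G : List (List Int)), Dom_way2 G → Pre_way2 G → Spec_way2 G (way2 G)

-- ===== LEMMAS AND PROOFS =====


lemma unseen_append_le (G : List (List Int)) (R C : Int) (S T : List (Int × Int)) :
    unseenCount G R C (S ++ T) ≤ unseenCount G R C S := by
  apply filter_length_le
  intro x _ hx
  simp only [Bool.and_eq_true, bne_iff_ne, ne_eq, Bool.not_eq_true', List.contains_eq_mem,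
    decide_eq_false_iff_not, List.mem_append] at hx ⊢
  exact ⟨hx.1, fun h => hx.2 (Or.inl h)⟩

lemma unseen_le_grid (G : List (List Int)) (R C : Int) (S : List (Int × Int)) :
    unseenCount G R C S ≤ (gridCells R C).length :=
  List.length_filter_le _ _

lemma fill_nil (G : List (List Int)) (R C : Int) (S : PySem.Set (Int × Int)) :
    way2AltFill G R C [] S = S := by
  rw [way2AltFill]

-- the heart: A's recursive DFS and B's explicit-stack fill explore identically
lemma dfs_fill (G : List (List Int)) (R C : Int) :
    ∀ (fuel : Nat) (S : PySem.Set (Int × Int)) (r c : Int),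
    unseenCount G R C S < fuel →
    ∃ T : List (Int × Int),
      way2Dfs G R C fuel r c S = ((T.map (fun p => cellAt G p.1 p.2)).sum, S ++ T) ∧
      (∀ q ∈ T, (0 ≤ q.1 ∧ q.1 < R) ∧ (0 ≤ q.2 ∧ q.2 < C) ∧ cellAt G q.1 q.2 ≠ 0 ∧ q ∉ S) ∧
      (S.Nodup → (S ++ T).Nodup) ∧
      (0 ≤ r → r < R → 0 ≤ c → c < C → cellAt G r c ≠ 0 → (r, c) ∉ S → (r, c) ∈ T) ∧
      (∀ st, way2AltFill G R C ((r, c) :: st) S = way2AltFill G R C st (S ++ T)) := by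
  intro fuel
  induction fuel with
  | zero => intro S r c h; exact absurd h (Nat.not_lt_zero _)
  | succ fuel ih =>
    intro S r c hfuel
    by_cases hc : (-1 < r ∧ r < R) ∧ (-1 < c ∧ c < C) ∧ cellAt G r c ≠ 0 ∧ (r, c) ∉ S
    · obtain ⟨⟨hr1, hr2⟩, ⟨hc1, hc2⟩, hnz, hns⟩ := hc
      have hS0 : PySem.Set.add S (r, c) = S ++ [(r, c)] := PySem.Set.add_of_not_mem hns
      have hu0 : unseenCount G R C (PySem.Set.add S (r, c)) < fuel :=
        Nat.lt_of_lt_of_le (unseen_lt_of_add ⟨by omega, hr2⟩ ⟨by omega, hc2⟩ hnz hns) (by omega)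
      obtain ⟨T1, hd1, hg1, hn1, _, hf1⟩ := ih (PySem.Set.add S (r, c)) (r - 1) c hu0
      have hu1 : unseenCount G R C (PySem.Set.add S (r, c) ++ T1) < fuel :=
        Nat.lt_of_le_of_lt (unseen_append_le G R C (PySem.Set.add S (r, c)) T1) hu0
      obtain ⟨T2, hd2, hg2, hn2, _, hf2⟩ := ih (PySem.Set.add S (r, c) ++ T1) r (c + 1) hu1
      have hu2 : unseenCount G R C (PySem.Set.add S (r, c) ++ T1 ++ T2) < fuel :=
        Nat.lt_of_le_of_lt (unseen_append_le G R C (PySem.Set.add S (r, c) ++ T1) T2) hu1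
      obtain ⟨T3, hd3, hg3, hn3, _, hf3⟩ := ih (PySem.Set.add S (r, c) ++ T1 ++ T2) (r + 1) c hu2
      have hu3 : unseenCount G R C (PySem.Set.add S (r, c) ++ T1 ++ T2 ++ T3) < fuel :=
        Nat.lt_of_le_of_lt (unseen_append_le G R C (PySem.Set.add S (r, c) ++ T1 ++ T2) T3) hu2
      obtain ⟨T4, hd4, hg4, hn4, _, hf4⟩ := ih (PySem.Set.add S (r, c) ++ T1 ++ T2 ++ T3) r (c - 1) hu3
      refine ⟨(r, c) :: (T1 ++ T2 ++ T3 ++ T4), ?_, ?_, ?_, ?_, ?_⟩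
      · rw [way2Dfs, if_pos ⟨⟨hr1, hr2⟩, ⟨hc1, hc2⟩, hnz, hns⟩]
        have hrange : PySem.List.pyRange 0 4 1 = [0, 1, 2, 3] := by decide
        rw [hrange]
        simp only [List.foldl]
        have e0 : PySem.List.pyGetD [(-1 : Int), 0, 1, 0] 0 0 = -1 := by decide
        have e1 : PySem.List.pyGetD [(-1 : Int), 0, 1, 0] 1 0 = 0 := by decide
        have e2 : PySem.List.pyGetD [(-1 : Int), 0, 1, 0] 2 0 = 1 := by decide
        have e3 : PySem.List.pyGetD [(-1 : Int), 0, 1, 0] 3 0 = 0 := by decide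
        have f0 : PySem.List.pyGetD [(0 : Int), 1, 0, -1] 0 0 = 0 := by decide
        have f1 : PySem.List.pyGetD [(0 : Int), 1, 0, -1] 1 0 = 1 := by decide
        have f2 : PySem.List.pyGetD [(0 : Int), 1, 0, -1] 2 0 = 0 := by decide
        have f3 : PySem.List.pyGetD [(0 : Int), 1, 0, -1] 3 0 = -1 := by decide
        simp only [e0, e1, e2, e3, f0, f1, f2, f3]
        have arg1 : r + -1 = r - 1 := by ring
        have arg2 : c + -1 = c - 1 := by ring
        simp only [add_zero, arg1, arg2]
        rw [hd1]
        simp only []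
        rw [hd2]
        simp only []
        rw [hd3]
        simp only []
        rw [hd4]
        simp only [List.map_cons, List.map_append, List.sum_cons, List.sum_append]
        rw [Prod.mk.injEq]
        constructor
        · ring
        · rw [hS0]; simp [List.append_assoc]
      · intro q hq
        have base : ∀ {x : Int × Int}, x ∉ PySem.Set.add S (r, c) → x ∉ S := by
          intro x hx hmem
          exact hx (by rw [PySem.Set.mem_add]; exact Or.inl hmem)
        have ext : ∀ {x : Int × Int} {L M : List (Int × Int)}, x ∉ L ++ M → x ∉ L := by
          intro x L M hx hmem
          exact hx (List.mem_append.mpr (Or.inl hmem))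
        rcases List.mem_cons.mp hq with rfl | hq'
        · exact ⟨⟨by omega, hr2⟩, ⟨by omega, hc2⟩, hnz, hns⟩
        · rcases List.mem_append.mp hq' with h123 | h4
          · rcases List.mem_append.mp h123 with h12 | h3
            · rcases List.mem_append.mp h12 with h1 | h2
              · obtain ⟨b1, b2, b3, b4⟩ := hg1 q h1
                exact ⟨b1, b2, b3, base b4⟩
              · obtain ⟨b1, b2, b3, b4⟩ := hg2 q h2
                exact ⟨b1, b2, b3, base (ext b4)⟩
            · obtain ⟨b1, b2, b3, b4⟩ := hg3 q h3
              exact ⟨b1, b2, b3, base (ext (ext b4))⟩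
          · obtain ⟨b1, b2, b3, b4⟩ := hg4 q h4
            exact ⟨b1, b2, b3, base (ext (ext (ext b4)))⟩
      · intro hS
        have h0 : (PySem.Set.add S (r, c)).Nodup := PySem.Set.nodup_add _ _ hS
        have h4 := hn4 (hn3 (hn2 (hn1 h0)))
        rw [hS0] at h4
        simpa [List.append_assoc] using h4
      · intro _ _ _ _ _ _
        exact List.mem_cons_self
      · intro st
        rw [way2AltFill, dif_pos ⟨⟨by omega, hr2⟩, ⟨by omega, hc2⟩, hnz, hns⟩]
        rw [hf1, hf2, hf3, hf4]
        rw [hS0]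
        simp [List.append_assoc]
    · refine ⟨[], ?_, by simp, by simp, ?_, ?_⟩
      · rw [way2Dfs, if_neg hc]; simp
      · intro h1 h2 h3 h4 h5 h6
        exact absurd ⟨⟨by omega, h2⟩, ⟨by omega, h4⟩, h5, h6⟩ hc
      · intro st
        rw [List.append_nil, way2AltFill, dif_neg]
        intro ⟨⟨g1, g2⟩, ⟨g3, g4⟩, g5, g6⟩
        exact hc ⟨⟨by omega, g2⟩, ⟨by omega, g4⟩, g5, g6⟩


lemma foldl_flatMap_pairs {σ : Type} (rows cols : List Int) (f : σ → Int → Int → σ) (init : σ) :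
    rows.foldl (fun st r => cols.foldl (fun st c => f st r c) st) init
      = (rows.flatMap (fun r => cols.map (fun c => (r, c)))).foldl (fun st p => f st p.1 p.2) init := by
  induction rows generalizing init with
  | nil => rfl
  | cons r rs ih => simp [List.flatMap_cons, List.foldl_append, ih, List.foldl_map]

lemma scan_sim (G : List (List Int)) (R C : Int) (fuel : Nat)
    (hfuel : (gridCells R C).length < fuel) :
    ∀ (cells : List (Int × Int)) (N : Int) (S : PySem.Set (Int × Int)),
    S.Nodup → (∀ q ∈ S, q ∈ gridCells R C ∧ cellAt G q.1 q.2 ≠ 0) →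
    (∀ p ∈ cells, p ∈ gridCells R C) →
    ∃ (S' : PySem.Set (Int × Int)) (N' : Int),
      cells.foldl (fun st p => if cellAt G p.1 p.2 ≠ 0 ∧ (p.1, p.2) ∉ st.2.2 then
          ((st.1 + (way2Dfs G R C fuel p.1 p.2 st.2.2).1, st.2.1 + 1,
            (way2Dfs G R C fuel p.1 p.2 st.2.2).2) : Int × Int × PySem.Set (Int × Int)) else st)
        ((S.map (fun q => cellAt G q.1 q.2)).sum, N, S)
        = ((S'.map (fun q => cellAt G q.1 q.2)).sum, N', S') ∧
      cells.foldl (fun st p => if cellAt G p.1 p.2 ≠ 0 ∧ (p.1, p.2) ∉ st.2 then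
          ((st.1 + 1, way2AltFill G R C [(p.1, p.2)] st.2) : Int × PySem.Set (Int × Int)) else st)
        (N, S) = (N', S') ∧
      S'.Nodup ∧ (∀ q ∈ S', q ∈ gridCells R C ∧ cellAt G q.1 q.2 ≠ 0) ∧
      (∀ x ∈ S, x ∈ S') ∧ (∀ p ∈ cells, cellAt G p.1 p.2 ≠ 0 → (p.1, p.2) ∈ S') := by
  intro cells
  induction cells with
  | nil =>
    intro N S hnod hgood _
    exact ⟨S, N, rfl, rfl, hnod, hgood, fun x h => h, by simp⟩
  | cons p ps ih =>
    intro N S hnod hgood hcells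
    have hpg : p ∈ gridCells R C := hcells p List.mem_cons_self
    have hpb := mem_gridCells.mp hpg
    by_cases hcp : cellAt G p.1 p.2 ≠ 0 ∧ (p.1, p.2) ∉ S
    · have hu : unseenCount G R C S < fuel := Nat.lt_of_le_of_lt (unseen_le_grid G R C S) hfuel
      obtain ⟨T, hdfs, hgoodT, hnodT, hmemT, hfill⟩ := dfs_fill G R C fuel S p.1 p.2 hu
      have hgood' : ∀ q ∈ S ++ T, q ∈ gridCells R C ∧ cellAt G q.1 q.2 ≠ 0 := by
        intro q hq
        rcases List.mem_append.mp hq with h | h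
        · exact hgood q h
        · obtain ⟨b1, b2, b3, _⟩ := hgoodT q h
          exact ⟨mem_gridCells.mpr ⟨b1.1, b1.2, b2.1, b2.2⟩, b3⟩
      obtain ⟨S', N', hA, hB, hn', hg', hsub', hcov'⟩ :=
        ih (N + 1) (S ++ T) (hnodT hnod) hgood' (fun q hq => hcells q (List.mem_cons_of_mem _ hq))
      have hpT : (p.1, p.2) ∈ T := hmemT hpb.1 hpb.2.1 hpb.2.2.1 hpb.2.2.2 hcp.1 hcp.2
      refine ⟨S', N', ?_, ?_, hn', hg', fun x hx => hsub' x (List.mem_append.mpr (Or.inl hx)), ?_⟩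
      · simp only [List.foldl_cons, if_pos hcp]
        rw [hdfs]
        simp only []
        rw [← hA, List.map_append, List.sum_append]
      · simp only [List.foldl_cons, if_pos hcp]
        rw [hfill [], fill_nil]
        exact hB
      · intro q hq hqnz
        rcases List.mem_cons.mp hq with rfl | hq'
        · exact hsub' _ (List.mem_append.mpr (Or.inr hpT))
        · exact hcov' q hq' hqnz
    · obtain ⟨S', N', hA, hB, hn', hg', hsub', hcov'⟩ :=
        ih N S hnod hgood (fun q hq => hcells q (List.mem_cons_of_mem _ hq))
      refine ⟨S', N', ?_, ?_, hn', hg', hsub', ?_⟩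
      · simpa only [List.foldl_cons, if_neg hcp] using hA
      · simpa only [List.foldl_cons, if_neg hcp] using hB
      · intro q hq hqnz
        rcases List.mem_cons.mp hq with rfl | hq'
        · rcases not_and_or.mp hcp with h | h
          · exact absurd hqnz h
          · exact hsub' _ (not_not.mp h)
        · exact hcov' q hq' hqnz

lemma nodup_pairs (rs cs : List Int) (hrs : rs.Nodup) (hcs : cs.Nodup) :
    (rs.flatMap (fun r => cs.map (fun c => (r, c)))).Nodup := by
  induction rs with
  | nil => simp
  | cons r rest ih =>
    simp only [List.flatMap_cons]
    apply List.Nodup.append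
    · exact hcs.map (fun a b h => (Prod.mk.injEq ..).mp h |>.2)
    · exact ih (List.nodup_cons.mp hrs).2
    · intro x hx hx'
      obtain ⟨c, _, rfl⟩ := List.mem_map.mp hx
      obtain ⟨r', hr', hx2⟩ := List.mem_flatMap.mp hx'
      obtain ⟨c', _, heq⟩ := List.mem_map.mp hx2
      have hr : r' = r := congrArg Prod.fst heq
      exact (List.nodup_cons.mp hrs).1 (hr ▸ hr')

lemma nodup_gridCells (R C : Int) : (gridCells R C).Nodup :=
  nodup_pairs _ _ (PySem.List.nodup_pyRange_one _ _) (PySem.List.nodup_pyRange_one _ _)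

lemma sum_map_filter_of_zero (l : List (Int × Int)) (P : Int × Int → Bool) (f : Int × Int → Int)
    (h : ∀ x ∈ l, ¬ P x → f x = 0) :
    ((l.filter P).map f).sum = (l.map f).sum := by
  induction l with
  | nil => rfl
  | cons x xs ih =>
    have ih' := ih (fun y hy => h y (List.mem_cons_of_mem _ hy))
    simp only [List.filter_cons]
    by_cases hp : P x
    · rw [if_pos hp]; simp [ih']
    · rw [if_neg (by simpa using hp)]
      simp [ih', h x List.mem_cons_self (by simpa using hp)]

lemma sum_range_getD_take (row : List Int) :
    ∀ n : Nat, ((List.range n).map (fun k => row.getD k 0)).sum = (row.take n).sum := by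
  intro n
  induction n with
  | zero => simp
  | succ n ih =>
    rw [List.range_succ, List.map_append, List.sum_append, ih, List.take_add_one]
    simp only [List.map_cons, List.map_nil, List.sum_cons, List.sum_nil, List.sum_append]
    cases h : row[n]? with
    | none => simp [List.getD, h]
    | some v => simp [List.getD, h]

lemma sum_map_pyRange_getD (row : List Int) (n : Nat) :
    ((PySem.List.pyRange 0 (n : Int) 1).map (fun c => PySem.List.pyGetD row c 0)).sum
      = (row.take n).sum := by
  rw [PySem.List.pyRange_one]
  simp only [List.map_map]
  rw [show ((n : Int) - 0).toNat = n by omega]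
  rw [← sum_range_getD_take row n]
  congr 1
  apply List.map_congr_left
  intro k _
  simp [PySem.List.pyGetD_natCast]


-- proof-side abbreviations for way2's locals
def valAt (G : List (List Int)) (p : Int × Int) : Int := cellAt G p.1 p.2
def theR (G : List (List Int)) : Int := G.length
def theC (G : List (List Int)) : Int := ((PySem.List.pyGetD G 0 [] : List Int).length : Int)
def theFuel (G : List (List Int)) : Nat := G.length * (PySem.List.pyGetD G 0 [] : List Int).length + 1

def bodyA (G : List (List Int)) (st : Int × Int × PySem.Set (Int × Int)) (p : Int × Int) :
    Int × Int × PySem.Set (Int × Int) :=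
  if cellAt G p.1 p.2 ≠ 0 ∧ (p.1, p.2) ∉ st.2.2 then
    (st.1 + (way2Dfs G (theR G) (theC G) (theFuel G) p.1 p.2 st.2.2).1, st.2.1 + 1,
      (way2Dfs G (theR G) (theC G) (theFuel G) p.1 p.2 st.2.2).2)
  else st

def bodyB (G : List (List Int)) (st : Int × PySem.Set (Int × Int)) (p : Int × Int) :
    Int × PySem.Set (Int × Int) :=
  if cellAt G p.1 p.2 ≠ 0 ∧ (p.1, p.2) ∉ st.2 then
    (st.1 + 1, way2AltFill G (theR G) (theC G) [(p.1, p.2)] st.2)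
  else st

lemma way2_flat (G : List (List Int)) :
    way2 G = PySem.Int.floordiv ((gridCells (theR G) (theC G)).foldl (bodyA G) (0, 0, [])).1
      ((gridCells (theR G) (theC G)).foldl (bodyA G) (0, 0, [])).2.1 := by
  have h := foldl_flatMap_pairs (σ := Int × Int × PySem.Set (Int × Int))
    (PySem.List.pyRange 0 (theR G) 1) (PySem.List.pyRange 0 (theC G) 1)
    (fun st r c => if cellAt G r c ≠ 0 ∧ (r, c) ∉ st.2.2 then
      (st.1 + (way2Dfs G (theR G) (theC G) (theFuel G) r c st.2.2).1, st.2.1 + 1,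
        (way2Dfs G (theR G) (theC G) (theFuel G) r c st.2.2).2)
    else st) (0, 0, [])
  exact congrArg (fun st : Int × Int × PySem.Set (Int × Int) => PySem.Int.floordiv st.1 st.2.1) h

lemma way2_alt_flat (G : List (List Int)) :
    way2_alt G = PySem.Int.floordiv
      ((G.map (fun row => (PySem.List.slice row none (some (theC G))).sum)).sum)
      ((gridCells (theR G) (theC G)).foldl (bodyB G) (0, [])).1 := by
  have h := foldl_flatMap_pairs (σ := Int × PySem.Set (Int × Int))
    (PySem.List.pyRange 0 (theR G) 1) (PySem.List.pyRange 0 (theC G) 1)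
    (fun st r c => if cellAt G r c ≠ 0 ∧ (r, c) ∉ st.2 then
      (st.1 + 1, way2AltFill G (theR G) (theC G) [(r, c)] st.2)
    else st) (0, [])
  exact congrArg (fun st : Int × PySem.Set (Int × Int) => PySem.Int.floordiv
    (G.map (fun row => (PySem.List.slice row none (some (theC G))).sum)).sum st.1) h

lemma length_gridCells (R C : Int) : (gridCells R C).length = R.toNat * C.toNat := by
  simp only [gridCells, List.length_flatMap, List.length_map, PySem.List.length_pyRange_one]
  rw [List.map_const', List.sum_replicate, smul_eq_mul, PySem.List.length_pyRange_one]
  simp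

lemma sum_flatMap' {α : Type} (l : List α) (f : α → List Int) :
    (l.flatMap f).sum = (l.map (fun a => (f a).sum)).sum := by
  induction l with
  | nil => rfl
  | cons x xs ih => simp [List.flatMap_cons, ih]

lemma total_eq (G : List (List Int)) :
    (G.map (fun row => (PySem.List.slice row none (some (theC G))).sum)).sum
      = ((gridCells (theR G) (theC G)).map (valAt G)).sum := by
  unfold theR theC
  rw [gridCells, List.map_flatMap, sum_flatMap']
  have hsum : ∀ r : Int,
      (((PySem.List.pyRange 0 ((PySem.List.pyGetD G 0 [] : List Int).length : Int) 1).map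
          (fun c => (r, c))).map (valAt G)).sum
        = ((PySem.List.pyGetD G r [] : List Int).take
            (PySem.List.pyGetD G 0 [] : List Int).length).sum := by
    intro r
    rw [List.map_map]
    rw [List.map_congr_left (fun c _ => (rfl :
      ((valAt G) ∘ (fun c => (r, c))) c = PySem.List.pyGetD (PySem.List.pyGetD G r []) c 0))]
    exact sum_map_pyRange_getD (PySem.List.pyGetD G r []) _
  rw [List.map_congr_left (fun r _ => hsum r)]
  have hrows : (PySem.List.pyRange 0 ((G.length : Nat) : Int) 1).map
      (fun r => ((PySem.List.pyGetD G r [] : List Int).take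
        (PySem.List.pyGetD G 0 [] : List Int).length).sum)
      = G.map (fun row => (row.take (PySem.List.pyGetD G 0 [] : List Int).length).sum) := by
    rw [show (fun r : Int => ((PySem.List.pyGetD G r [] : List Int).take
        (PySem.List.pyGetD G 0 [] : List Int).length).sum)
      = (fun row : List Int => (row.take (PySem.List.pyGetD G 0 [] : List Int).length).sum)
          ∘ (fun j : Int => PySem.List.pyGetD G j []) from rfl]
    rw [← List.map_map]
    rw [PySem.List.map_pyGetD_pyRange_zero']
  rw [hrows]
  congr 1
  apply List.map_congr_left
  intro row _
  congr 1
  exact PySem.List.slice_to_natCast row _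

theorem way2_main (G : List (List Int)) : way2 G = way2_alt G := by
  have hfuel : (gridCells (theR G) (theC G)).length < theFuel G := by
    rw [length_gridCells]
    unfold theR theC theFuel
    simp only [Int.toNat_natCast]
    omega
  obtain ⟨S', N', hA, hB, hn', hg', _, hcov⟩ :=
    scan_sim G (theR G) (theC G) (theFuel G) hfuel (gridCells (theR G) (theC G)) 0 []
      List.nodup_nil (by simp) (fun p hp => hp)
  simp only [List.map_nil, List.sum_nil] at hA
  have eA : (gridCells (theR G) (theC G)).foldl (bodyA G) (0, 0, []) =
      ((S'.map (valAt G)).sum, N', S') := hA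
  have eB : (gridCells (theR G) (theC G)).foldl (bodyB G) (0, []) = (N', S') := hB
  rw [way2_flat, way2_alt_flat, eA, eB]
  have hperm : S'.Perm ((gridCells (theR G) (theC G)).filter (fun p => cellAt G p.1 p.2 != 0)) := by
    apply List.perm_of_nodup_nodup_toFinset_eq hn'
    · exact (nodup_gridCells _ _).filter _
    · ext q
      simp only [List.mem_toFinset, List.mem_filter, bne_iff_ne, ne_eq]
      constructor
      · intro hq; exact hg' q hq
      · rintro ⟨h1, h2⟩
        have := hcov q h1 h2
        simpa using this
  have h1 : (S'.map (valAt G)).sum =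
      (((gridCells (theR G) (theC G)).filter (fun p => cellAt G p.1 p.2 != 0)).map (valAt G)).sum :=
    (hperm.map (valAt G)).sum_eq
  have h2 := sum_map_filter_of_zero (gridCells (theR G) (theC G))
    (fun p => cellAt G p.1 p.2 != 0) (valAt G) (by intro x _ hx; simpa [valAt] using hx)
  rw [total_eq]
  simp only []
  rw [h1, h2]

-- ===== VERDICT (by name: the statement is the Claim_ definition above) =====
theorem way2_spec : Claim_equal_way2 := by
  intro G _ _
  unfold Spec_way2
  exact way2_main G
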